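-- pv_equiv track=rewrite | github.com/fmartinache/xaosim | xaosim/zernike.py | noll_2_zern
-- ===== SOURCE A (Python) =====
-- def noll_2_zern(j):
--     '''------------------------------------------
--     Noll index converted to Zernike indices
--
--     j: Noll index
--     n: radial Zernike index
--     m: azimuthal Zernike index
--    ------------------------------------------ '''
--     if (j == 0):
--         raise ValueError("Noll indices start at 1")
--
--     n = 0
--     j1 = j-1
--     while (j1 > n):
--         n += 1
--         j1 -= n
--
--     m = (-1)**j * ((n % 2) + 2 * int((j1+((n+1) % 2)) / 2.0))
--     return (n, m)
-- ===== SOURCE B (Python) =====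
-- import math
--
-- def noll_2_zern(j):
--     '''Noll index -> Zernike (n, m), radial order found in O(1) by an
--     integer-sqrt inverse of the triangular numbers instead of a loop.'''
--     if (j == 0):
--         raise ValueError("Noll indices start at 1")
--     n = (math.isqrt(8 * (j - 1) + 1) - 1) // 2
--     j1 = (j - 1) - n * (n + 1) // 2
--     m = (-1) ** j * ((n % 2) + 2 * ((j1 + (n + 1) % 2) // 2))
--     return (n, m)
-- ===== Notes on version B (the rewrite author's own statement) =====
-- stated objective: faster
-- what changed: The while-loop that finds the radial order by repeatedly subtracting 1,2,3,... is replaced by a closed-form inverse of the triangular numbers via math.isqrt, making the lookup O(1) in arithmetic operations instead of O(sqrt(j)) iterations.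
-- outside the precondition, e.g. on noll_2_zern(-3): A returns (0, 2.0), B raises ValueError; on noll_2_zern(0): A raises ValueError, B raises ValueError
import Mathlib
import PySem

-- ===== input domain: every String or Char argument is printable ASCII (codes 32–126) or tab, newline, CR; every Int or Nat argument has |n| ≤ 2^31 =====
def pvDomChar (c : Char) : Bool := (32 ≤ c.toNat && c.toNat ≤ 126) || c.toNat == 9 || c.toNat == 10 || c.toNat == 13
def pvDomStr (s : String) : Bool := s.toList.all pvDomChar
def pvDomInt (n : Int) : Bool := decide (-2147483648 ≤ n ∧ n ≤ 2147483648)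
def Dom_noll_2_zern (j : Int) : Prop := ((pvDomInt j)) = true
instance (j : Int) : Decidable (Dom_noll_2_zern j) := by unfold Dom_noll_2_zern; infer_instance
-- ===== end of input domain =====

-- B replaces A's while-loop (repeated subtraction of 1,2,3,... to find the radial
-- order) with a closed-form inverse of the triangular numbers via integer sqrt;
-- objective: faster (O(1) arithmetic instead of O(sqrt j) loop iterations).


-- ===== PORT A =====
-- the `while (j1 > n): n += 1; j1 -= n` loop, with fuel; the loop body subtracts
-- the incremented n, so each step decreases j1 by at least 1 while j1 > n ≥ 0,
-- hence fuel (j-1).toNat suffices on every input Pre_ admits.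
def nollLoopA (fuel : Nat) (n j1 : Int) : Int × Int :=
  match fuel with
  | 0 => (n, j1)
  | f + 1 => if j1 > n then nollLoopA f (n + 1) (j1 - (n + 1)) else (n, j1)

def noll_2_zern (j : Int) : Int × Int :=
  -- `if j == 0: raise ValueError` : j = 0 is excluded by Pre_noll_2_zern
  let p := nollLoopA (j - 1).toNat 0 (j - 1)
  let n := p.1
  let j1 := p.2
  -- (-1)**j ported as a parity test and int((…)/2.0) as floor division: both are
  -- exact for every j ≥ 1 admitted by Pre_ (there the int() operand is a small
  -- nonnegative value, where float division by 2 is exact and truncation = floor;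
  -- for j < 0 Python's (-1)**j is a float, which Pre_ excludes).
  let m := (if PySem.Int.mod j 2 == 0 then (1 : Int) else -1) *
             (PySem.Int.mod n 2 + 2 * PySem.Int.floordiv (j1 + PySem.Int.mod (n + 1) 2) 2)
  (n, m)

-- ===== PORT B =====
def noll_2_zern_alt (j : Int) : Int × Int :=
  -- `if j == 0: raise ValueError` : excluded by Pre_noll_2_zern
  -- math.isqrt → Nat.sqrt (isqrt raises on negative arguments, i.e. j < 1: outside Pre_)
  let n : Int := PySem.Int.floordiv ((Nat.sqrt (8 * (j - 1) + 1).toNat : Int) - 1) 2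
  let j1 : Int := (j - 1) - PySem.Int.floordiv (n * (n + 1)) 2
  -- same parity port of (-1)**j as above, exact on Pre_
  let m := (if PySem.Int.mod j 2 == 0 then (1 : Int) else -1) *
             (PySem.Int.mod n 2 + 2 * PySem.Int.floordiv (j1 + PySem.Int.mod (n + 1) 2) 2)
  (n, m)

-- ===== PRECONDITION & SPEC =====
-- Pre_ excludes j ≤ 0: at j = 0 the Python A raises ValueError, and for j < 0
-- Python's (-1)**j is a float, so A returns a float m (e.g. (0, 2.0) at j = -3),
-- not a value of the declared int × int type.
def Pre_noll_2_zern (j : Int) : Prop := 1 ≤ j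
instance (j : Int) : Decidable (Pre_noll_2_zern j) := by unfold Pre_noll_2_zern; infer_instance
def pvWitness_noll_2_zern : Int := 7

def Spec_noll_2_zern (j : Int) (out : Int × Int) : Prop := out = noll_2_zern_alt j
instance (j : Int) (out : Int × Int) : Decidable (Spec_noll_2_zern j out) := by unfold Spec_noll_2_zern; infer_instance

-- ===== CLAIM (what is proved, stated in full; the proofs are below) =====
def Claim_equal_noll_2_zern : Prop := ∀ (j : Int), Dom_noll_2_zern j → Pre_noll_2_zern j → Spec_noll_2_zern j (noll_2_zern j)

-- ===== LEMMAS AND PROOFS =====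

-- The loop, run with enough fuel from a state whose j1 encodes k minus the n-th
-- triangular number, stops exactly at the radial order n₀ characterized by
-- n₀(n₀+1) ≤ 2k < (n₀+1)(n₀+2).
lemma nollLoopA_spec (fuel : Nat) : ∀ (n j1 k n₀ : Int), 0 ≤ n → n ≤ n₀ → n₀ ≤ n + fuel →
    2 * j1 + n * (n + 1) = 2 * k → n₀ * (n₀ + 1) ≤ 2 * k → 2 * k < (n₀ + 1) * (n₀ + 2) →
    nollLoopA fuel n j1 = (n₀, k - PySem.Int.floordiv (n₀ * (n₀ + 1)) 2) := by
  induction fuel with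
  | zero =>
    intro n j1 k n₀ hn hle hub hinv hlo hhi
    have hn0 : n = n₀ := by omega
    subst hn0
    have hfd : PySem.Int.floordiv (n * (n + 1)) 2 = k - j1 := by
      rw [PySem.Int.floordiv_eq_iff_of_pos (by norm_num)]
      constructor <;> nlinarith
    simp [nollLoopA]
    omega
  | succ f ih =>
    intro n j1 k n₀ hn hle hub hinv hlo hhi
    by_cases hgt : j1 > n
    · -- loop runs: n < n₀, recurse on the updated state
      have hlt : n < n₀ := by
        rcases lt_or_eq_of_le hle with h | h
        · exact h
        · exfalso; subst h; nlinarith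
      have := ih (n + 1) (j1 - (n + 1)) k n₀ (by omega) (by omega) (by omega)
        (by ring_nf; ring_nf at hinv; omega) hlo hhi
      simpa [nollLoopA, hgt] using this
    · -- loop stops: n = n₀
      have hn0 : n = n₀ := by
        rcases lt_or_eq_of_le hle with h | h
        · exfalso
          have h1 : (n + 1) * (n + 2) ≤ n₀ * (n₀ + 1) := by nlinarith
          nlinarith
        · exact h
      subst hn0
      have hfd : PySem.Int.floordiv (n * (n + 1)) 2 = k - j1 := by
        rw [PySem.Int.floordiv_eq_iff_of_pos (by norm_num)]
        constructor <;> nlinarith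
      simp [nollLoopA, hgt]
      omega

-- The integer-sqrt closed form produces exactly that radial order n₀.
lemma sqrt_bounds (k : Int) (hk : 0 ≤ k) :
    0 ≤ PySem.Int.floordiv ((Nat.sqrt (8 * k + 1).toNat : Int) - 1) 2 ∧
    PySem.Int.floordiv ((Nat.sqrt (8 * k + 1).toNat : Int) - 1) 2 ≤ k ∧
    (PySem.Int.floordiv ((Nat.sqrt (8 * k + 1).toNat : Int) - 1) 2) *
      (PySem.Int.floordiv ((Nat.sqrt (8 * k + 1).toNat : Int) - 1) 2 + 1) ≤ 2 * k ∧
    2 * k < (PySem.Int.floordiv ((Nat.sqrt (8 * k + 1).toNat : Int) - 1) 2 + 1) *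
      (PySem.Int.floordiv ((Nat.sqrt (8 * k + 1).toNat : Int) - 1) 2 + 2) := by
  set t : Nat := (8 * k + 1).toNat with ht
  have htk : (t : Int) = 8 * k + 1 := by omega
  set s : Nat := Nat.sqrt t with hs
  have hsl : (s : Int) * (s : Int) ≤ 8 * k + 1 := by
    have h := Nat.sqrt_le' t
    rw [pow_two] at h
    rw [← htk]; exact_mod_cast h
  have hsu : 8 * k + 1 < ((s : Int) + 1) * ((s : Int) + 1) := by
    have h := Nat.lt_succ_sqrt' t
    rw [Nat.succ_eq_add_one, pow_two] at h
    rw [← htk]; exact_mod_cast h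
  have hs1 : 1 ≤ (s : Int) := by nlinarith [Int.natCast_nonneg s]
  set n₀ : Int := PySem.Int.floordiv ((s : Int) - 1) 2 with hn0
  have hdiv : n₀ * 2 ≤ (s : Int) - 1 ∧ (s : Int) - 1 < (n₀ + 1) * 2 := by
    rw [hn0, ← PySem.Int.floordiv_eq_iff_of_pos (by norm_num)]
  obtain ⟨hd1, hd2⟩ := hdiv
  have hge : 0 ≤ n₀ := by omega
  refine ⟨hge, ?_, ?_, ?_⟩
  · nlinarith
  · nlinarith
  · nlinarith

-- ===== VERDICT (by name: the statement is the Claim_ definition above) =====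
theorem noll_2_zern_spec : Claim_equal_noll_2_zern := by
  intro j _ hpre
  unfold Spec_noll_2_zern
  have hk : 0 ≤ j - 1 := by exact sub_nonneg.mpr hpre
  obtain ⟨h0, hle, hlo, hhi⟩ := sqrt_bounds (j - 1) hk
  set n₀ : Int := PySem.Int.floordiv ((Nat.sqrt (8 * (j - 1) + 1).toNat : Int) - 1) 2 with hn0
  have hfuel : n₀ ≤ 0 + ((j - 1).toNat : Int) := by omega
  have hloop : nollLoopA (j - 1).toNat 0 (j - 1) =
      (n₀, (j - 1) - PySem.Int.floordiv (n₀ * (n₀ + 1)) 2) := by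
    apply nollLoopA_spec (j - 1).toNat 0 (j - 1) (j - 1) n₀ le_rfl h0 (by omega)
      (by ring) hlo hhi
  simp only [noll_2_zern, noll_2_zern_alt, hloop, ← hn0]
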